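-- pv_equiv track=rewrite | github.com/fabien-208/cours | cours/L1/Algorithme/ds 2021.py | javanais
-- ===== SOURCE A (Python) =====
-- def est_voyelle(car: str)-> bool:
--     voyelle = ['a','e','i','o','u','y']
--     if len(car) > 1:
--         return False
--     return(car in voyelle)
--
-- def javanais(l):
--     liste = ''
--     car = ''
--     for elt in l:
--         if est_voyelle(elt) and not est_voyelle(car):
--             liste += 'av'
--         liste += elt
--         car = elt
--     return liste
-- ===== SOURCE B (Python) =====
-- def est_voyelle(car: str) -> bool:
--     voyelle = ['a', 'e', 'i', 'o', 'u', 'y']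
--     if len(car) > 1:
--         return False
--     return car in voyelle
--
-- def javanais(l):
--     cs = list(l)
--     n = len(cs)
--     pieces = []
--     i = 0
--     while i < n:
--         k = est_voyelle(cs[i])
--         j = i + 1
--         while j < n and est_voyelle(cs[j]) == k:
--             j += 1
--         run = ''.join(cs[i:j])
--         pieces.append('av' + run if k else run)
--         i = j
--     return ''.join(pieces)
-- ===== Notes on version B (the rewrite author's own statement) =====
-- stated objective: alternative
-- what changed: replaces A's character-by-character stateful loop (string += with a carried previous character) by a run-grouping algorithm: an outer index loop finds each maximal run of consecutive characters with the same vowel-flag via an inner scan, and the marker is prepended once per vowel run before joining the run slices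
import Mathlib
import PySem

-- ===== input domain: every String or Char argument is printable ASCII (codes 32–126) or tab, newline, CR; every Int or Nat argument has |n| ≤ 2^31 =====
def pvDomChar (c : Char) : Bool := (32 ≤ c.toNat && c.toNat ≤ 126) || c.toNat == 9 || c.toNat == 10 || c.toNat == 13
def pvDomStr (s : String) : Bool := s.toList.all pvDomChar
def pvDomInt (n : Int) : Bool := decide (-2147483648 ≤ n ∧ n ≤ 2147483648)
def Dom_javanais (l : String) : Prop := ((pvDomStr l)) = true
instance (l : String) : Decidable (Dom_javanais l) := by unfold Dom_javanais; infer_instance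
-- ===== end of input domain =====

-- B groups the input into maximal runs of equal vowel-flag and prepends the marker once per vowel run, instead of A's per-character loop with a carried previous character (alternative decomposition, same cost).

-- ===== PORT A =====
-- est_voyelle: the Python str argument is ported as List Char
def estVoyelle (car : List Char) : Bool :=
  let voyelle : List (List Char) := [['a'], ['e'], ['i'], ['o'], ['u'], ['y']]
  if car.length > 1 then false else voyelle.contains car

def javanais (l : String) : String :=
  String.ofList ((l.toList.foldl
    (fun (st : List Char × List Char) elt =>
      let liste := if estVoyelle [elt] && !(estVoyelle st.2) then st.1 ++ ['a', 'v'] else st.1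
      (liste ++ [elt], [elt]))
    ([], [])).1)

-- ===== PORT B =====
-- identical helper, B's own copy
def estVoyelleAlt (car : List Char) : Bool :=
  let voyelle : List (List Char) := [['a'], ['e'], ['i'], ['o'], ['u'], ['y']]
  if car.length > 1 then false else voyelle.contains car

-- inner while-loop of Source B: advance j while cs[j] has vowel-flag k
def jvRunEnd (cs : List Char) (k : Bool) (j : Nat) : Nat :=
  if h : j < cs.length then
    if estVoyelleAlt [cs[j]] == k then jvRunEnd cs k (j + 1) else j
  else j
termination_by cs.length - j
decreasing_by omega

-- needed by jvLoop's termination proof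
theorem jvRunEnd_ge (cs : List Char) (k : Bool) (j : Nat) : j ≤ jvRunEnd cs k j := by
  rw [jvRunEnd]
  split
  · split
    · exact le_trans (Nat.le_succ j) (jvRunEnd_ge cs k (j + 1))
    · exact le_rfl
  · exact le_rfl
termination_by cs.length - j
decreasing_by omega

-- outer while-loop of Source B, accumulating the run pieces
def jvLoop (cs : List Char) (i : Nat) (pieces : List (List Char)) : List (List Char) :=
  if h : i < cs.length then
    let k := estVoyelleAlt [cs[i]]
    let j := jvRunEnd cs k (i + 1)
    let run := (cs.drop i).take (j - i)   -- cs[i:j]; exact since 0 ≤ i ≤ j here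
    jvLoop cs j (pieces ++ [if k then 'a' :: 'v' :: run else run])
  else pieces
termination_by cs.length - i
decreasing_by have := jvRunEnd_ge cs (estVoyelleAlt [cs[i]]) (i + 1); omega

def javanais_alt (l : String) : String :=
  String.ofList ((jvLoop l.toList 0 []).flatten)

-- ===== PRECONDITION & SPEC =====
def Spec_javanais (l : String) (out : String) : Prop := out = javanais_alt l
instance (l : String) (out : String) : Decidable (Spec_javanais l out) := by unfold Spec_javanais; infer_instance

-- ===== CLAIM (what is proved, stated in full; the proofs are below) =====
def Claim_equal_javanais : Prop := ∀ (l : String), Dom_javanais l → Spec_javanais l (javanais l)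

-- ===== LEMMAS AND PROOFS =====

-- canonical form of A's loop: emit each char, with the marker before a vowel whose previous flag pv is false
def jvBody (cs : List Char) (pv : Bool) : List Char :=
  match cs with
  | [] => []
  | c :: cs' =>
      (if estVoyelle [c] && !pv then 'a' :: 'v' :: [c] else [c]) ++ jvBody cs' (estVoyelle [c])

theorem jvA_eq (cs : List Char) : ∀ (acc car : List Char),
    (cs.foldl
      (fun (st : List Char × List Char) elt =>
        let liste := if estVoyelle [elt] && !(estVoyelle st.2) then st.1 ++ ['a', 'v'] else st.1
        (liste ++ [elt], [elt]))
      (acc, car)).1 = acc ++ jvBody cs (estVoyelle car) := by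
  induction cs with
  | nil => intro acc car; simp [jvBody]
  | cons c cs ih =>
      intro acc car
      simp only [List.foldl_cons, jvBody]
      rw [ih]
      by_cases h : estVoyelle [c] && !(estVoyelle car) <;> simp [h]

theorem estVoyelleAlt_eq (car : List Char) : estVoyelleAlt car = estVoyelle car := rfl

-- jvRunEnd computes j + length of the maximal flag-k prefix of cs.drop j
theorem jvRunEnd_spec (cs : List Char) (k : Bool) (j : Nat) :
    jvRunEnd cs k j = j + ((cs.drop j).takeWhile (fun d => estVoyelle [d] == k)).length := by
  rw [jvRunEnd]
  split
  · rename_i h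
    rw [List.drop_eq_getElem_cons h]
    split
    · rename_i hk
      rw [jvRunEnd_spec cs k (j + 1)]
      have hk' : (estVoyelle [cs[j]] == k) = true := by rw [← estVoyelleAlt_eq]; exact hk
      rw [List.takeWhile_cons, hk']
      simp only [if_true, List.length_cons]
      omega
    · rename_i hk
      have hk' : (estVoyelle [cs[j]] == k) = false := by
        rw [← estVoyelleAlt_eq]; simpa using hk
      rw [List.takeWhile_cons, hk']
      simp
  · rename_i h
    rw [List.drop_eq_nil_of_le (by omega)]
    simp
termination_by cs.length - j
decreasing_by omega

-- within a run of flag pv, jvBody emits the characters unchanged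
theorem jvBody_run (pre : List Char) (k : Bool) : ∀ (suf : List Char),
    (∀ d ∈ pre, estVoyelle [d] = k) → jvBody (pre ++ suf) k = pre ++ jvBody suf k := by
  induction pre with
  | nil => intro suf _; simp
  | cons d pre ih =>
      intro suf hall
      have hd : estVoyelle [d] = k := hall d (by simp)
      simp only [List.cons_append, jvBody, hd]
      rw [ih suf (fun e he => hall e (by simp [he]))]
      cases k <;> simp

-- pv is irrelevant when the head is not a vowel (or the list is empty)
theorem jvBody_pv (suf : List Char) (pv : Bool)
    (h : suf = [] ∨ ∃ d ds, suf = d :: ds ∧ estVoyelle [d] = false) :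
    jvBody suf pv = jvBody suf false := by
  rcases h with rfl | ⟨d, ds, rfl, hd⟩
  · rfl
  · simp [jvBody, hd]

-- the head of dropWhile does not satisfy the predicate
theorem dropWhile_head (p : Char → Bool) (l : List Char) :
    l.dropWhile p = [] ∨ ∃ d ds, l.dropWhile p = d :: ds ∧ p d = false := by
  induction l with
  | nil => left; rfl
  | cons c l ih =>
      by_cases hc : p c
      · simpa [List.dropWhile_cons, hc] using ih
      · right; exact ⟨c, l, by simp [hc], by simpa using hc⟩

theorem jvLoop_spec (cs : List Char) (i : Nat) (pieces : List (List Char)) :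
    (jvLoop cs i pieces).flatten = pieces.flatten ++ jvBody (cs.drop i) false := by
  rw [jvLoop]
  split
  · rename_i h
    simp only []
    set k := estVoyelleAlt [cs[i]] with hk
    have hkv : estVoyelle [cs[i]] = k := by rw [hk, estVoyelleAlt_eq]
    set p : Char → Bool := fun d => estVoyelle [d] == k with hp
    have hje : jvRunEnd cs k (i + 1) = (i + 1) + ((cs.drop (i + 1)).takeWhile p).length :=
      jvRunEnd_spec cs k (i + 1)
    set t := ((cs.drop (i + 1)).takeWhile p).length with ht
    -- the slice cs[i:j] is cs[i] followed by the takeWhile prefix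
    have hdropi : cs.drop i = cs[i] :: cs.drop (i + 1) := List.drop_eq_getElem_cons h
    have htw : (cs.drop (i + 1)).takeWhile p = (cs.drop (i + 1)).take t :=
      List.prefix_iff_eq_take.mp (List.takeWhile_prefix p)
    have h2 : (i + 1) + t - i = t + 1 := by omega
    have hrun : (cs.drop i).take (jvRunEnd cs k (i + 1) - i)
        = cs[i] :: (cs.drop (i + 1)).takeWhile p := by
      rw [hje, hdropi, h2, List.take_succ_cons, htw]
    have hsplit : cs.drop (i + 1) = (cs.drop (i + 1)).takeWhile p ++ (cs.drop (i + 1)).dropWhile p :=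
      (List.takeWhile_append_dropWhile).symm
    have hdropj : cs.drop (jvRunEnd cs k (i + 1)) = (cs.drop (i + 1)).dropWhile p := by
      rw [hje, ← List.drop_drop]
      conv_lhs => rw [hsplit]
      rw [List.drop_left' (by rw [ht])]
    rw [jvLoop_spec cs (jvRunEnd cs k (i + 1))]
    rw [hrun, hdropj, hdropi]
    have hall : ∀ d ∈ (cs.drop (i + 1)).takeWhile p, estVoyelle [d] = k := by
      intro d hd
      have := List.mem_takeWhile_imp hd
      simpa [hp] using this
    have hbody : jvBody (cs[i] :: cs.drop (i + 1)) false
        = (if k then 'a' :: 'v' :: [cs[i]] else [cs[i]])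
          ++ ((cs.drop (i + 1)).takeWhile p ++ jvBody ((cs.drop (i + 1)).dropWhile p) false) := by
      conv_lhs => rw [jvBody]
      rw [hkv]
      congr 1
      · simp
      · conv_lhs => rw [hsplit]
        rw [jvBody_run _ k _ hall]
        congr 1
        by_cases hk2 : k = true
        · refine jvBody_pv _ k ?_
          rcases dropWhile_head p (cs.drop (i + 1)) with hnil | ⟨d, ds, hds, hd⟩
          · exact Or.inl hnil
          · refine Or.inr ⟨d, ds, hds, ?_⟩
            simp only [hp, hk2] at hd
            simpa using hd
        · have hk3 : k = false := by simpa using hk2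
          rw [hk3]
    rw [hbody]
    simp only [List.flatten_append, List.flatten_cons, List.flatten_nil, List.append_nil,
      List.append_assoc]
    split_ifs <;> simp
  · rename_i h
    rw [List.drop_eq_nil_of_le (by omega)]
    simp [jvBody]
termination_by cs.length - i
decreasing_by have := jvRunEnd_ge cs (estVoyelleAlt [cs[i]]) (i + 1); omega

-- ===== VERDICT (by name: the statement is the Claim_ definition above) =====
theorem javanais_spec : Claim_equal_javanais := by
  intro l _
  unfold Spec_javanais javanais javanais_alt
  rw [jvA_eq l.toList [] []]
  rw [jvLoop_spec l.toList 0 []]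
  have : estVoyelle [] = false := by decide
  simp [this]
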